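-- pv_equiv track=rewrite | github.com/Muhammed-fahad/coding | Zoho - 2/next_same_day.py | next_same_calendar
-- ===== SOURCE A (Python) =====
-- def is_leap(year):
--     return (year % 4 == 0 and year % 100 != 0) or (year % 400 == 0)
--
-- def next_same_calendar(year):
--     shift = 0
--     orig_leap = is_leap(year)
--     y = year
--     while True:
--         y += 1
--         shift += 2 if is_leap(y) else 1
--         if shift % 7 == 0 and is_leap(y) == orig_leap:
--             return y
-- ===== SOURCE B (Python) =====
-- def is_leap(year):
--     return (year % 4 == 0 and year % 100 != 0) or (year % 400 == 0)
--
-- def _dow(y):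
--     # Gregorian day-of-week index of Jan 1 of year y, in closed form
--     return (365 * y + y // 4 - y // 100 + y // 400) % 7
--
-- def next_same_calendar(year):
--     ref = _dow(year)
--     orig_leap = is_leap(year)
--     y = year + 1
--     while not (_dow(y) == ref and is_leap(y) == orig_leap):
--         y += 1
--     return y
-- ===== Notes on version B (the rewrite author's own statement) =====
-- stated objective: alternative
-- what changed: A maintains an accumulated weekly shift counter across the loop; B maintains no running state and instead recomputes an absolute closed-form day-of-week index of New Year's Day (from floor-division leap-year counts) for each candidate year and compares it to the reference year's index.
import Mathlib
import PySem

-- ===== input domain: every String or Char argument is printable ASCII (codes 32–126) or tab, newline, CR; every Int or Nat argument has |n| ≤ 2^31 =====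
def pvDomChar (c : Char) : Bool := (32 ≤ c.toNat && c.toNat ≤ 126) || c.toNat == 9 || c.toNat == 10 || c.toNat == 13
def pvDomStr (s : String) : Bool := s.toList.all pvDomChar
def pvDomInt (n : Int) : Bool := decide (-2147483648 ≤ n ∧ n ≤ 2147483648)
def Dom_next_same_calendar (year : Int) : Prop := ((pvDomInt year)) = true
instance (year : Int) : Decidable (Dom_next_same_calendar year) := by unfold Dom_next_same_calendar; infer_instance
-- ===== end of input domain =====

-- B replaces A's accumulated week-shift counter with a closed-form absolute day-of-week
-- index of New Year's Day recomputed each step (alternative decomposition, same cost).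


-- ===== PORT A =====
def is_leap (year : Int) : Bool :=
  (PySem.Int.mod year 4 == 0 && !(PySem.Int.mod year 100 == 0)) || PySem.Int.mod year 400 == 0

-- A's 'while True' loop, carrying (shift, y); the fuel argument only makes it total
-- (the loop always returns within the fuel bound, since the calendar repeats with period 400).
def loopA (orig : Bool) (shift y : Int) (fuel : Nat) : Int :=
  match fuel with
  | 0 => 0
  | fuel + 1 =>
    let y' := y + 1
    let shift' := shift + (if is_leap y' then 2 else 1)
    if PySem.Int.mod shift' 7 == 0 && (is_leap y' == orig) then y'
    else loopA orig shift' y' fuel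

def next_same_calendar (year : Int) : Int :=
  loopA (is_leap year) 0 year 400

-- ===== PORT B =====
-- closed-form weekday index of New Year's Day of year y
def dow (y : Int) : Int :=
  PySem.Int.mod (365 * y + PySem.Int.floordiv y 4 - PySem.Int.floordiv y 100 + PySem.Int.floordiv y 400) 7

def loopB (ref : Int) (orig : Bool) (y : Int) (fuel : Nat) : Int :=
  match fuel with
  | 0 => 0
  | fuel + 1 =>
    if dow y == ref && (is_leap y == orig) then y
    else loopB ref orig (y + 1) fuel

def next_same_calendar_alt (year : Int) : Int :=
  loopB (dow year) (is_leap year) (year + 1) 400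

-- ===== PRECONDITION & SPEC =====
def Spec_next_same_calendar (year : Int) (out : Int) : Prop := out = next_same_calendar_alt year
instance (year : Int) (out : Int) : Decidable (Spec_next_same_calendar year out) := by unfold Spec_next_same_calendar; infer_instance

-- ===== CLAIM (what is proved, stated in full; the proofs are below) =====
def Claim_equal_next_same_calendar : Prop := ∀ (year : Int), Dom_next_same_calendar year → Spec_next_same_calendar year (next_same_calendar year)

-- ===== LEMMAS AND PROOFS =====

def leapCount (y : Int) : Int := y / 4 - y / 100 + y / 400

theorem pymod_pos (a : Int) (b : Int) (hb : 0 < b) : PySem.Int.mod a b = a % b :=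
  PySem.Int.mod_eq_emod_of_pos hb

theorem dow_eq (y : Int) : dow y = (365 * y + leapCount y) % 7 := by
  unfold dow leapCount
  rw [pymod_pos _ _ (by norm_num),
      PySem.Int.floordiv_eq_ediv_of_pos (by norm_num : (0:Int) < 4),
      PySem.Int.floordiv_eq_ediv_of_pos (by norm_num : (0:Int) < 100),
      PySem.Int.floordiv_eq_ediv_of_pos (by norm_num : (0:Int) < 400)]
  ring_nf

theorem is_leap_iff (y : Int) :
    is_leap y = true ↔ ((y % 4 = 0 ∧ y % 100 ≠ 0) ∨ y % 400 = 0) := by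
  unfold is_leap
  rw [pymod_pos _ _ (by norm_num : (0:Int) < 4),
      pymod_pos _ _ (by norm_num : (0:Int) < 100),
      pymod_pos _ _ (by norm_num : (0:Int) < 400)]
  simp

theorem leapCount_step (y : Int) :
    leapCount y = leapCount (y - 1) + (if is_leap y then 1 else 0) := by
  unfold leapCount
  split_ifs with h
  · rw [is_leap_iff] at h; omega
  · rw [is_leap_iff] at h; push Not at h; omega

-- with the invariant shift = (y - year) + (leap count in (year, y]),
-- A's test 'shift % 7 == 0' is B's test 'dow y == dow year'
theorem cond_equiv (year y shift : Int)
    (hinv : shift = (y - year) + (leapCount y - leapCount year)) :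
    (PySem.Int.mod shift 7 == 0) = (dow y == dow year) := by
  rw [pymod_pos _ _ (by norm_num : (0:Int) < 7), dow_eq, dow_eq, Bool.eq_iff_iff]
  simp only [beq_iff_eq]
  subst hinv
  constructor <;> intro h <;> omega

theorem loop_eq (year : Int) (fuel : Nat) :
    ∀ (y shift : Int), shift = (y - year) + (leapCount y - leapCount year) →
      loopA (is_leap year) shift y fuel = loopB (dow year) (is_leap year) (y + 1) fuel := by
  induction fuel with
  | zero => intro y shift _; rfl
  | succ n ih =>
    intro y shift hinv
    set s' := shift + (if is_leap (y + 1) then 2 else 1) with hs'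
    have hstep : s' = (y + 1 - year) + (leapCount (y + 1) - leapCount year) := by
      have hlc := leapCount_step (y + 1)
      simp only [add_sub_cancel_right] at hlc
      by_cases h : is_leap (y + 1) = true
      · rw [hs', if_pos h]; rw [if_pos h] at hlc; omega
      · rw [hs', if_neg h]; rw [if_neg h] at hlc; omega
    have hc := cond_equiv year (y + 1) s' hstep
    simp only [loopA, loopB, ← hs', hc]
    split_ifs with h
    · rfl
    · exact ih (y + 1) s' hstep

-- ===== VERDICT (by name: the statement is the Claim_ definition above) =====
theorem next_same_calendar_spec : Claim_equal_next_same_calendar := by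
  intro year _
  unfold Spec_next_same_calendar next_same_calendar next_same_calendar_alt
  exact loop_eq year 400 year 0 (by ring)
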